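-- pv_equiv track=rewrite | github.com/mh13test/annonces_v2 | app.py | looks_like_challenge
-- ===== SOURCE A (Python) =====
-- def looks_like_challenge(html: str) -> bool:
--     h = (html or "").lower()
--     return any(s in h for s in [
--         "captcha",
--         "cf-challenge",
--         "cloudflare",
--         "checking your browser",
--         "/cdn-cgi/",
--         "turnstile",
--     ])
-- ===== SOURCE B (Python) =====
-- def looks_like_challenge(html: str) -> bool:
--     h = (html or "").lower()
--     markers = ("captcha", "cf-challenge", "cloudflare",
--                "checking your browser", "/cdn-cgi/", "turnstile")
--     for i in range(len(h)):
--         if any(h.startswith(m, i) for m in markers):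
--             return True
--     return False
-- ===== Notes on version B (the rewrite author's own statement) =====
-- stated objective: alternative
-- what changed: Replaces six independent full substring scans (one 'in' pass per marker) with a single left-to-right scan over positions that tests all markers at each offset, returning at the first hit.
import Mathlib
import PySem

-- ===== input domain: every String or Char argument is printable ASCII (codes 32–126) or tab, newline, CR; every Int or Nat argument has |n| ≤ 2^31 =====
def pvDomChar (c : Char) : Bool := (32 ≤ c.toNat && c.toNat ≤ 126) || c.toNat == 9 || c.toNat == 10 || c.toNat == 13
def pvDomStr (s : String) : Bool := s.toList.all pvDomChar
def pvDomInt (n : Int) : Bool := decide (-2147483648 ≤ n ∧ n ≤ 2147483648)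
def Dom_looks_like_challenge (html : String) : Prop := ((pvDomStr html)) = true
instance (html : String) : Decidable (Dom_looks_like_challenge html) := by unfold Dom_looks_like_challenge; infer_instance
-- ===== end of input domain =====

-- B replaces A's six independent substring scans with a single left-to-right scan over positions
-- testing every marker at each offset (objective: alternative; same asymptotic cost).

-- ===== PORT A =====
-- Port of A: h = (html or "").lower(); any(s in h for s in markers)
def looks_like_challenge (html : String) : Bool :=
  let h := PySem.Str.lower (if html == "" then "" else html)
  (["captcha", "cf-challenge", "cloudflare", "checking your browser",
    "/cdn-cgi/", "turnstile"] : List String).any (fun s => PySem.Str.isIn s h)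

-- ===== PORT B =====
-- markers of B, as char lists
def pvMarkers : List (List Char) :=
  ["captcha".toList, "cf-challenge".toList, "cloudflare".toList,
   "checking your browser".toList, "/cdn-cgi/".toList, "turnstile".toList]

-- B's position loop: for i in range(len(h)): if any(h.startswith(m, i) ...): return True
def pvScan : List Char → Bool
  | [] => false
  | c :: t =>
    if pvMarkers.any (fun m => PySem.Chars.startswith (c :: t) m) then true
    else pvScan t

def looks_like_challenge_alt (html : String) : Bool :=
  let h := PySem.Chars.lower (if html == "" then "" else html).toList
  pvScan h

-- ===== PRECONDITION & SPEC =====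
def Spec_looks_like_challenge (html : String) (out : Bool) : Prop := out = looks_like_challenge_alt html
instance (html : String) (out : Bool) : Decidable (Spec_looks_like_challenge html out) := by unfold Spec_looks_like_challenge; infer_instance

-- ===== CLAIM (what is proved, stated in full; the proofs are below) =====
def Claim_equal_looks_like_challenge : Prop := ∀ (html : String), Dom_looks_like_challenge html → Spec_looks_like_challenge html (looks_like_challenge html)

-- ===== LEMMAS AND PROOFS =====

-- ===== VERDICT (by name: the statement is the Claim_ definition above) =====
lemma pv_any_or {α : Type} (xs : List α) (f g : α → Bool) :
    xs.any (fun x => f x || g x) = (xs.any f || xs.any g) := by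
  induction xs with
  | nil => simp
  | cons a t ih => cases hf : f a <;> cases hg : g a <;> simp [hf, hg, ih]

lemma pv_isIn_cons (m : List Char) (c : Char) (t : List Char) :
    PySem.Chars.isIn m (c :: t)
      = (PySem.Chars.startswith (c :: t) m || PySem.Chars.isIn m t) := by
  rw [Bool.eq_iff_iff]
  simp [PySem.Chars.isIn_iff_infix, PySem.Chars.startswith_iff, List.infix_cons_iff]

lemma pvScan_eq_any_isIn (t : List Char) :
    pvScan t = pvMarkers.any (fun m => PySem.Chars.isIn m t) := by
  induction t with
  | nil => decide
  | cons c t ih =>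
    simp only [pvScan, Bool.if_true_left]
    rw [ih]
    have : (pvMarkers.any (fun m => PySem.Chars.isIn m (c :: t)))
        = pvMarkers.any (fun m => PySem.Chars.startswith (c :: t) m || PySem.Chars.isIn m t) := by
      simp only [pv_isIn_cons]
    rw [this, pv_any_or]
    rw [Bool.eq_iff_iff]
    simp [List.any_eq_true]

theorem looks_like_challenge_spec : Claim_equal_looks_like_challenge := by
  intro html _
  unfold Spec_looks_like_challenge looks_like_challenge looks_like_challenge_alt
  rw [pvScan_eq_any_isIn]
  simp [pvMarkers]
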